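-- pv_equiv track=rewrite | github.com/YaronKoresh/definers | src/definers/application_ml/repository_sync.py | is_huggingface_repo_id
-- ===== SOURCE A (Python) =====
-- def is_huggingface_repo_id(value: str) -> bool:
--     if not isinstance(value, str) or not value or "/" not in value:
--         return False
--     user, name = value.split("/", 1)
--     if not user or not name:
--         return False
--     allowed_characters = set(
--         "abcdefghijklmnopqrstuvwxyzABCDEFGHIJKLMNOPQRSTUVWXYZ0123456789._-"
--     )
--     return all(
--         character in allowed_characters for character in user
--     ) and all(character in allowed_characters for character in name)
-- ===== SOURCE B (Python) =====
-- def is_huggingface_repo_id(value: str) -> bool: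
--     if not isinstance(value, str):
--         return False
--     allowed = frozenset(
--         "abcdefghijklmnopqrstuvwxyzABCDEFGHIJKLMNOPQRSTUVWXYZ0123456789._-"
--     )
--     # one-pass DFA: 0 = start, 1 = inside user part, 2 = just after '/', 3 = inside name part
--     state = 0
--     for ch in value:
--         if ch in allowed:
--             if state == 0:
--                 state = 1
--             elif state == 2:
--                 state = 3
--         elif ch == "/" and state == 1:
--             state = 2
--         else:
--             return False
--     return state == 3
-- ===== Notes on version B (the rewrite author's own statement) =====
-- stated objective: alternative
-- what changed: Replaces split('/',1) plus two per-part character-membership scans with a single one-pass four-state DFA over the string that validates user, slash and name in one traversal.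
import Mathlib
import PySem

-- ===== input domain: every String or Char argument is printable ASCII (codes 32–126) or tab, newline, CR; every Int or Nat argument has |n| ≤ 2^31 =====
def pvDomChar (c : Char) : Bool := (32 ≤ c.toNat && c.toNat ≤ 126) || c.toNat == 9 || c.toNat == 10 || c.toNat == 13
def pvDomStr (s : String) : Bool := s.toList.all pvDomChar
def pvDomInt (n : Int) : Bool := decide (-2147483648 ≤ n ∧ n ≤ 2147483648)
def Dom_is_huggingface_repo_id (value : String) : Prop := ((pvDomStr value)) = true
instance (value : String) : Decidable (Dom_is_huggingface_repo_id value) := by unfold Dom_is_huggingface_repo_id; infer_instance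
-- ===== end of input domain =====

-- B replaces split('/',1) + two per-part membership scans by a single one-pass four-state DFA; same cost, alternative algorithm.


-- ===== PORT A =====
-- allowed_characters = set("…")
def hfAllowedA : PySem.Set Char :=
  PySem.Set.ofList "abcdefghijklmnopqrstuvwxyzABCDEFGHIJKLMNOPQRSTUVWXYZ0123456789._-".toList

def is_huggingface_repo_id (value : String) : Bool :=
  if value = "" ∨ PySem.Str.isIn "/" value = false then false
  else
    match PySem.Str.splitMax? value "/" 1 with
    | some [user, name] =>
        if user = "" ∨ name = "" then false
        else (user.toList.all (fun c => hfAllowedA.contains c))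
          && (name.toList.all (fun c => hfAllowedA.contains c))
    | _ => false  -- unreachable: with "/" in value, split("/", 1) yields exactly two parts

-- ===== PORT B =====
def hfAllowedB : PySem.Set Char :=
  PySem.Set.ofList "abcdefghijklmnopqrstuvwxyzABCDEFGHIJKLMNOPQRSTUVWXYZ0123456789._-".toList

-- the for-loop of Source B: state 0 start, 1 in user, 2 just after '/', 3 in name; early `return False` ≙ result 4
def hfLoop (st : Nat) (cs : List Char) : Nat :=
  match cs with
  | [] => st
  | c :: r =>
    if hfAllowedB.contains c then
      hfLoop (if st = 0 then 1 else if st = 2 then 3 else st) r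
    else if c == '/' && st == 1 then hfLoop 2 r
    else 4

def is_huggingface_repo_id_alt (value : String) : Bool :=
  hfLoop 0 value.toList == 3

-- ===== PRECONDITION & SPEC =====
def Spec_is_huggingface_repo_id (value : String) (out : Bool) : Prop := out = is_huggingface_repo_id_alt value
instance (value : String) (out : Bool) : Decidable (Spec_is_huggingface_repo_id value out) := by unfold Spec_is_huggingface_repo_id; infer_instance

-- ===== CLAIM (what is proved, stated in full; the proofs are below) =====
def Claim_equal_is_huggingface_repo_id : Prop := ∀ (value : String), Dom_is_huggingface_repo_id value → Spec_is_huggingface_repo_id value (is_huggingface_repo_id value)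

-- ===== LEMMAS AND PROOFS =====

-- split at the FIRST '/': none if there is no '/', else (part before, part after)
def splitFirst : List Char → Option (List Char × List Char)
  | [] => none
  | c :: cs => if c = '/' then some ([], cs) else (splitFirst cs).map (fun p => (c :: p.1, p.2))

lemma splitFirst_none_iff (cs : List Char) : splitFirst cs = none ↔ '/' ∉ cs := by
  induction cs with
  | nil => simp [splitFirst]
  | cons c r ih =>
    by_cases hc : c = '/' <;> simp [splitFirst, hc, ih, eq_comm]

lemma hf_go_zero (sep : List Char) (fuel : Nat) (l cur : List Char) (acc : List (List Char)) :
    PySem.Chars.splitOnMax.go sep fuel 0 l cur acc = ((cur.reverse ++ l) :: acc).reverse := by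
  cases fuel with
  | zero => rw [PySem.Chars.splitOnMax.go]
  | succ f => cases l with
    | nil => rw [PySem.Chars.splitOnMax.go]; simp; omega
    | cons c r => rw [PySem.Chars.splitOnMax.go]; simp

lemma hf_go_one (fuel : Nat) : ∀ (l cur : List Char) (acc : List (List Char)), l.length ≤ fuel →
    PySem.Chars.splitOnMax.go ['/'] fuel 1 l cur acc =
      (match splitFirst l with
       | none => ((cur.reverse ++ l) :: acc).reverse
       | some (u, n) => (n :: (cur.reverse ++ u) :: acc).reverse) := by
  induction fuel with
  | zero =>
    intro l cur acc h
    have hl : l = [] := by simpa using h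
    subst hl
    rw [PySem.Chars.splitOnMax.go]; simp [splitFirst]
  | succ f ih =>
    intro l cur acc h
    cases l with
    | nil => rw [PySem.Chars.splitOnMax.go]; simp [splitFirst]; omega
    | cons c r =>
      rw [PySem.Chars.splitOnMax.go]
      by_cases hc : c = '/'
      · subst hc
        simp [List.isPrefixOf, hf_go_zero, splitFirst]
      · have hpre : (['/'].isPrefixOf (c :: r)) = false := by
          simp [List.isPrefixOf]; exact fun h => absurd h.symm hc
        have hr : r.length ≤ f := by simpa using h
        simp only [hpre, if_neg (by omega : ¬ (1 : Nat) = 0), Bool.false_eq_true, if_false,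
          ih r (c :: cur) acc hr]
        simp [splitFirst, hc]
        cases hs : splitFirst r with
        | none => simp
        | some p => simp

lemma splitOnMax_slash (cs : List Char) :
    PySem.Chars.splitOnMax cs ['/'] 1 =
      (match splitFirst cs with
       | none => [cs]
       | some (u, n) => [u, n]) := by
  unfold PySem.Chars.splitOnMax
  rw [if_neg (by omega)]
  simp only [Int.toNat_one]
  rw [hf_go_one (cs.length + 1) cs [] [] (by omega)]
  cases hs : splitFirst cs with
  | none => simp
  | some p => simp

set_option maxRecDepth 8192 in
lemma hfAllowedB_slash : hfAllowedB.contains '/' = false := by decide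

set_option maxRecDepth 8192 in
lemma hf_slash_not_mem : '/' ∉ hfAllowedB := by decide

lemma hfLoop_three (cs : List Char) :
    hfLoop 3 cs = if cs.all (fun c => hfAllowedB.contains c) then 3 else 4 := by
  induction cs with
  | nil => simp [hfLoop]
  | cons c r ih =>
    by_cases hc : hfAllowedB.contains c = true <;>
      simp_all [hfLoop]

lemma hfLoop_two (cs : List Char) :
    hfLoop 2 cs = if cs.isEmpty then 2
      else if cs.all (fun c => hfAllowedB.contains c) then 3 else 4 := by
  cases cs with
  | nil => simp [hfLoop]
  | cons c r =>
    by_cases hc : hfAllowedB.contains c = true <;>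
      simp_all [hfLoop, hfLoop_three]

lemma hfLoop_one (cs : List Char) :
    hfLoop 1 cs =
      (match splitFirst cs with
       | none => if cs.all (fun c => hfAllowedB.contains c) then 1 else 4
       | some (u, n) =>
         if u.all (fun c => hfAllowedB.contains c) then
           (if n.isEmpty then 2 else if n.all (fun c => hfAllowedB.contains c) then 3 else 4)
         else 4) := by
  induction cs with
  | nil => simp [hfLoop, splitFirst]
  | cons c r ih =>
    by_cases hc : hfAllowedB.contains c = true
    · have hcs : ¬ c = '/' := by
        intro h; rw [h, hfAllowedB_slash] at hc; simp at hc
      simp only [hfLoop, hc, if_true, if_neg (by omega : ¬ (1:Nat) = 0),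
        if_neg (by omega : ¬ (1:Nat) = 2), ih, splitFirst, if_neg hcs]
      cases hs : splitFirst r with
      | none => simp_all
      | some p => simp_all
    · by_cases hsl : c = '/'
      · subst hsl
        simp [hfLoop, splitFirst, hfLoop_two, hf_slash_not_mem]
      · have : (c == '/') = false := by simp [hsl]
        simp only [hfLoop, hc, Bool.false_eq_true, if_false, this, Bool.false_and, splitFirst,
          if_neg hsl]
        cases hs : splitFirst r with
        | none => simp_all
        | some p => simp_all

-- the two allowed sets are the same set
lemma hfAllowed_eq : hfAllowedA = hfAllowedB := rfl

-- full list-level equivalence of the two algorithms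
lemma hf_top (cs : List Char) :
    (match splitFirst cs with
     | none => false
     | some (u, n) =>
       if u = [] ∨ n = [] then false
       else (u.all (fun c => hfAllowedA.contains c)) && (n.all (fun c => hfAllowedA.contains c)))
    = (hfLoop 0 cs == 3) := by
  cases cs with
  | nil => simp [splitFirst, hfLoop]
  | cons c r =>
    by_cases hc : hfAllowedB.contains c = true
    · have hcs : ¬ c = '/' := by
        intro h; rw [h, hfAllowedB_slash] at hc; simp at hc
      simp only [hfLoop, hc, if_true, hfLoop_one, splitFirst, if_neg hcs]
      cases hs : splitFirst r with
      | none => simp; split_ifs <;> simp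
      | some p =>
        obtain ⟨u', n⟩ := p
        simp only [Option.map_some]
        by_cases hu : u'.all (fun c => hfAllowedB.contains c) = true
        · cases n with
          | nil => simp; split_ifs <;> simp_all
          | cons d m =>
            by_cases hn : (d :: m).all (fun c => hfAllowedB.contains c) = true
            · simp_all [hfAllowed_eq, List.all_eq_true]
            · simp_all [hfAllowed_eq, List.all_eq_true]
              split_ifs <;> simp_all
        · simp_all [hfAllowed_eq, List.all_eq_true]
          split_ifs <;> simp_all
    · by_cases hsl : c = '/'
      · subst hsl
        simp [splitFirst, hfLoop, hf_slash_not_mem]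
      · have hb : (c == '/') = false := by simp [hsl]
        simp only [splitFirst, if_neg hsl, hfLoop, hc, Bool.false_eq_true, if_false, hb,
          Bool.false_and]
        cases hs : splitFirst r with
        | none => simp
        | some p =>
          obtain ⟨u', n⟩ := p
          rcases n with _ | ⟨d, m⟩ <;> simp_all [hfAllowed_eq]

lemma hf_isIn_slash (value : String) :
    PySem.Str.isIn "/" value = true ↔ '/' ∈ value.toList := by
  rw [PySem.Str.isIn_iff_infix]
  show ['/'] <:+: value.toList ↔ _
  exact List.singleton_infix_iff '/' value.toList

-- ===== VERDICT (by name: the statement is the Claim_ definition above) =====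
theorem is_huggingface_repo_id_spec : Claim_equal_is_huggingface_repo_id := by
  intro value _
  unfold Spec_is_huggingface_repo_id is_huggingface_repo_id is_huggingface_repo_id_alt
  by_cases hin : '/' ∈ value.toList
  · have hIn : PySem.Str.isIn "/" value = true := (hf_isIn_slash value).mpr hin
    have hemp : ¬ value = "" := by
      intro h; subst h; simp at hin
    have hIn' : PySem.Chars.isIn ['/'] value.toList = true :=
      (PySem.Chars.isIn_iff_infix _ _).mpr ((List.singleton_infix_iff '/' value.toList).mpr hin)
    rw [if_neg (by simp [hemp, hIn'])]
    cases h : splitFirst value.toList with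
    | none => exact absurd ((splitFirst_none_iff value.toList).mp h) (by simp [hin])
    | some p =>
      obtain ⟨u, n⟩ := p
      have hsl : ("/" : String).toList = ['/'] := rfl
      have hs : PySem.Str.splitMax? value "/" 1 = some [String.ofList u, String.ofList n] := by
        simp [PySem.Str.splitMax?, PySem.Chars.splitMax?, hsl, splitOnMax_slash, h]
      rw [hs]
      have := hf_top value.toList
      rw [h] at this
      rw [← this]
      simp [String.ofList_eq_empty_iff]
  · have hIn : PySem.Str.isIn "/" value = false := by
      rw [← Bool.not_eq_true]; exact fun h => hin ((hf_isIn_slash value).mp h)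
    rw [if_pos (Or.inr hIn)]
    have := hf_top value.toList
    rw [(splitFirst_none_iff value.toList).mpr hin] at this
    rw [← this]
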